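-- pv_equiv track=rewrite | github.com/vvihorev/combustion-web-app | first_criteria/data_processing/vibrations.py | assignGroup
-- ===== SOURCE A (Python) =====
-- def assignGroup(n):
--     """ Return the group that the engine with 'n' belongs to
--         n - frequency of the engine """
--     groups = {
--         1:(0,500),
--         2:(500,750),
--         3:(750,1500),
--         4:(1500,10000)
--     }
--     n = int(n)
--     for group in groups.keys():
--         if n >= groups[group][0] and n < groups[group][1]:
--             return group
--     return -1
-- ===== SOURCE B (Python) =====
-- import bisect
--
-- _BOUNDS = [0, 500, 750, 1500, 10000]
--
-- def assignGroup(n):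
--     """ Return the group that the engine with 'n' belongs to
--         n - frequency of the engine """
--     i = bisect.bisect_right(_BOUNDS, int(n))
--     return i if 1 <= i <= 4 else -1
-- ===== Notes on version B (the rewrite author's own statement) =====
-- stated objective: idiomatic
-- what changed: Replaced the sequential scan over the four group ranges with a single bisect_right binary search on a sorted boundary table [0,500,750,1500,10000], returning the index when it lands in 1..4 and the out-of-range sentinel otherwise.
import Mathlib
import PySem

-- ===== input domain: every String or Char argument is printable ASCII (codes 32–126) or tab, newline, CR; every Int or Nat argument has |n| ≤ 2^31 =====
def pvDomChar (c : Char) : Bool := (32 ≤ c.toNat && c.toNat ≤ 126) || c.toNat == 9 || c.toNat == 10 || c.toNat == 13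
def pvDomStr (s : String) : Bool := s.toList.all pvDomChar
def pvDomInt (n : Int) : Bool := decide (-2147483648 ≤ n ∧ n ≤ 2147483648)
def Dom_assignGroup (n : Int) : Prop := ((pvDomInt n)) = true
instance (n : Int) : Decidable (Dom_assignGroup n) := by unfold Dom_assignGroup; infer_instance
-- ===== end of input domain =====

-- B replaces A's linear scan over the group ranges with a bisect_right lookup on a
-- sorted boundary table (idiomatic; same O(1) cost).

-- ===== PORT A =====
-- A's groups dict, in insertion order (keys 1..4 mapped to (lo, hi) pairs).
def agGroups : PySem.Dict Int (Int × Int) :=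
  PySem.Dict.mk [(1, (0, 500)), (2, (500, 750)), (3, (750, 1500)), (4, (1500, 10000))]

-- the 'for group in groups.keys(): …' loop of A, first matching key or -1
def agLoop (n : Int) : List Int → Int
  | [] => -1
  | g :: rest =>
    match PySem.Dict.get? agGroups g with
    | some (lo, hi) => if n ≥ lo ∧ n < hi then g else agLoop n rest
    | none => agLoop n rest   -- unreachable: keys come from agGroups itself

def assignGroup (n : Int) : Int :=
  agLoop n (PySem.Dict.keys agGroups)

-- ===== PORT B =====
def agBounds : List Int := [0, 500, 750, 1500, 10000]

def assignGroup_alt (n : Int) : Int :=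
  let i := PySem.List.bisectRight agBounds n
  if 1 ≤ i ∧ i ≤ 4 then (i : Int) else -1

-- ===== PRECONDITION & SPEC =====
def Spec_assignGroup (n : Int) (out : Int) : Prop := out = assignGroup_alt n
instance (n : Int) (out : Int) : Decidable (Spec_assignGroup n out) := by unfold Spec_assignGroup; infer_instance

-- ===== CLAIM (what is proved, stated in full; the proofs are below) =====
def Claim_equal_assignGroup : Prop := ∀ (n : Int), Dom_assignGroup n → Spec_assignGroup n (assignGroup n)

-- ===== LEMMAS AND PROOFS =====

-- ===== VERDICT (by name: the statement is the Claim_ definition above) =====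
theorem assignGroup_spec : Claim_equal_assignGroup := by
  intro n _
  unfold Spec_assignGroup assignGroup assignGroup_alt
  simp [agGroups, agBounds, agLoop, PySem.Dict.keys_mk, PySem.Dict.get?, List.find?,
    PySem.List.bisectRight, PySem.List.bisectRightLoop]
  split_ifs <;> omega
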